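-- pv_equiv track=rewrite | github.com/mrinank1301/DAA-project-1 | Backend/utils/helpers.py | extract_dietary_restrictions
-- ===== SOURCE A (Python) =====
-- from typing import List, Dict, Any, Set, Optional
--
-- def extract_dietary_restrictions(tags: List[str]) -> Dict[str, bool]:
--     """
--     Extract dietary restriction information from tags.
--     """
--     dietary_map = {
--         'vegetarian': False,
--         'vegan': False,
--         'gluten_free': False,
--         'dairy_free': False,
--         'nut_free': False,
--         'keto': False,
--         'paleo': False,
--         'low_carb': False,
--         'high_protein': False,
--         'low_sodium': False
--     }
--
--     tag_mappings = {
--         'vegetarian': 'vegetarian',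
--         'vegan': 'vegan',
--         'gluten-free': 'gluten_free',
--         'gluten free': 'gluten_free',
--         'dairy-free': 'dairy_free',
--         'dairy free': 'dairy_free',
--         'nut-free': 'nut_free',
--         'nut free': 'nut_free',
--         'keto': 'keto',
--         'ketogenic': 'keto',
--         'paleo': 'paleo',
--         'low-carb': 'low_carb',
--         'low carb': 'low_carb',
--         'high-protein': 'high_protein',
--         'high protein': 'high_protein',
--         'low-sodium': 'low_sodium',
--         'low sodium': 'low_sodium'
--     }
--
--     for tag in tags:
--         tag_lower = tag.lower().strip()
--         if tag_lower in tag_mappings: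
--             dietary_map[tag_mappings[tag_lower]] = True
--
--     return dietary_map
-- ===== SOURCE B (Python) =====
-- from typing import List, Dict
--
-- def extract_dietary_restrictions(tags: List[str]) -> Dict[str, bool]:
--     """
--     Extract dietary restriction information from tags.
--     """
--     normalized = {t.lower().strip() for t in tags}
--     categories = {
--         'vegetarian': ['vegetarian'],
--         'vegan': ['vegan'],
--         'gluten_free': ['gluten-free', 'gluten free'],
--         'dairy_free': ['dairy-free', 'dairy free'],
--         'nut_free': ['nut-free', 'nut free'],
--         'keto': ['keto', 'ketogenic'],
--         'paleo': ['paleo'],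
--         'low_carb': ['low-carb', 'low carb'],
--         'high_protein': ['high-protein', 'high protein'],
--         'low_sodium': ['low-sodium', 'low sodium'],
--     }
--     return {key: any(syn in normalized for syn in syns) for key, syns in categories.items()}
-- ===== Notes on version B (the rewrite author's own statement) =====
-- stated objective: idiomatic
-- what changed: B normalizes the tags once into a set and then loops over the ten output categories (each with its list of synonyms), producing the result with a dict comprehension using any(); A instead loops over the tags, looking each one up in a synonym-to-key dict and mutating a pre-initialized flags dict.
import Mathlib
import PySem

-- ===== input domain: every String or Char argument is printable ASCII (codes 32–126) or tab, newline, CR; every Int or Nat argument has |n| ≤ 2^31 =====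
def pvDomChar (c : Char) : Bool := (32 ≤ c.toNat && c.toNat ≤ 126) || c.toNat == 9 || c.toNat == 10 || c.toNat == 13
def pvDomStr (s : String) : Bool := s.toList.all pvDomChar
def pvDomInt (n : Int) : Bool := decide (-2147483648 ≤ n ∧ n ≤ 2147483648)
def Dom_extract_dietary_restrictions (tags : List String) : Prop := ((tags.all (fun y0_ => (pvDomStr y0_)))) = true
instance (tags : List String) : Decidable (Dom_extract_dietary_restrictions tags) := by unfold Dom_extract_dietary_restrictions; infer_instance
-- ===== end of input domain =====

-- B builds a normalized tag set once and loops over the ten categories with any(), instead of A's loop over tags mutating a flags dict (objective: more idiomatic; same return value).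


-- ===== PORT A =====
-- tag.lower().strip(), shared normalisation helper
def pvNorm (t : String) : String := PySem.Str.strip (PySem.Str.lower t)

def pvDietaryMap0 : PySem.Dict String Bool := PySem.Dict.mk
  [("vegetarian", false), ("vegan", false), ("gluten_free", false), ("dairy_free", false),
   ("nut_free", false), ("keto", false), ("paleo", false), ("low_carb", false),
   ("high_protein", false), ("low_sodium", false)]

def pvTagMappings : PySem.Dict String String := PySem.Dict.mk
  [("vegetarian", "vegetarian"), ("vegan", "vegan"),
   ("gluten-free", "gluten_free"), ("gluten free", "gluten_free"),
   ("dairy-free", "dairy_free"), ("dairy free", "dairy_free"),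
   ("nut-free", "nut_free"), ("nut free", "nut_free"),
   ("keto", "keto"), ("ketogenic", "keto"), ("paleo", "paleo"),
   ("low-carb", "low_carb"), ("low carb", "low_carb"),
   ("high-protein", "high_protein"), ("high protein", "high_protein"),
   ("low-sodium", "low_sodium"), ("low sodium", "low_sodium")]

-- 'if tag_lower in tag_mappings: dietary_map[tag_mappings[tag_lower]] = True'
def pvStepA (d : PySem.Dict String Bool) (tag : String) : PySem.Dict String Bool :=
  let tag_lower := pvNorm tag
  match pvTagMappings.get? tag_lower with
  | some k => d.insert k true
  | none => d

def extract_dietary_restrictions (tags : List String) : List (String × Bool) :=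
  (tags.foldl pvStepA pvDietaryMap0).items

-- ===== PORT B =====
def pvCategories : List (String × List String) :=
  [("vegetarian", ["vegetarian"]), ("vegan", ["vegan"]),
   ("gluten_free", ["gluten-free", "gluten free"]),
   ("dairy_free", ["dairy-free", "dairy free"]),
   ("nut_free", ["nut-free", "nut free"]),
   ("keto", ["keto", "ketogenic"]), ("paleo", ["paleo"]),
   ("low_carb", ["low-carb", "low carb"]),
   ("high_protein", ["high-protein", "high protein"]),
   ("low_sodium", ["low-sodium", "low sodium"])]

def extract_dietary_restrictions_alt (tags : List String) : List (String × Bool) :=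
  let normalized : PySem.Set String := PySem.Set.ofList (tags.map pvNorm)
  pvCategories.map (fun kv => (kv.1, kv.2.any (fun syn => PySem.Set.contains normalized syn)))

-- ===== PRECONDITION & SPEC =====
def Spec_extract_dietary_restrictions (tags : List String) (out : List (String × Bool)) : Prop := out = extract_dietary_restrictions_alt tags
instance (tags : List String) (out : List (String × Bool)) : Decidable (Spec_extract_dietary_restrictions tags out) := by unfold Spec_extract_dietary_restrictions; infer_instance

-- ===== CLAIM (what is proved, stated in full; the proofs are below) =====
def Claim_equal_extract_dietary_restrictions : Prop := ∀ (tags : List String), Dom_extract_dietary_restrictions tags → Spec_extract_dietary_restrictions tags (extract_dietary_restrictions tags)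

-- ===== LEMMAS AND PROOFS =====

-- the shape of the flags dict throughout A's loop
def pvMk (b1 b2 b3 b4 b5 b6 b7 b8 b9 b10 : Bool) : PySem.Dict String Bool := PySem.Dict.mk
  [("vegetarian", b1), ("vegan", b2), ("gluten_free", b3), ("dairy_free", b4),
   ("nut_free", b5), ("keto", b6), ("paleo", b7), ("low_carb", b8),
   ("high_protein", b9), ("low_sodium", b10)]

-- per-category hit predicates on a single tag
def pvQ1 (t : String) : Bool := pvNorm t == "vegetarian"
def pvQ2 (t : String) : Bool := pvNorm t == "vegan"
def pvQ3 (t : String) : Bool := pvNorm t == "gluten-free" || pvNorm t == "gluten free"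
def pvQ4 (t : String) : Bool := pvNorm t == "dairy-free" || pvNorm t == "dairy free"
def pvQ5 (t : String) : Bool := pvNorm t == "nut-free" || pvNorm t == "nut free"
def pvQ6 (t : String) : Bool := pvNorm t == "keto" || pvNorm t == "ketogenic"
def pvQ7 (t : String) : Bool := pvNorm t == "paleo"
def pvQ8 (t : String) : Bool := pvNorm t == "low-carb" || pvNorm t == "low carb"
def pvQ9 (t : String) : Bool := pvNorm t == "high-protein" || pvNorm t == "high protein"
def pvQ10 (t : String) : Bool := pvNorm t == "low-sodium" || pvNorm t == "low sodium"

lemma pvStepA_mk (t : String) (b1 b2 b3 b4 b5 b6 b7 b8 b9 b10 : Bool) :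
    pvStepA (pvMk b1 b2 b3 b4 b5 b6 b7 b8 b9 b10) t =
    pvMk (b1 || pvQ1 t) (b2 || pvQ2 t) (b3 || pvQ3 t) (b4 || pvQ4 t) (b5 || pvQ5 t)
         (b6 || pvQ6 t) (b7 || pvQ7 t) (b8 || pvQ8 t) (b9 || pvQ9 t) (b10 || pvQ10 t) := by
  unfold pvStepA pvQ1 pvQ2 pvQ3 pvQ4 pvQ5 pvQ6 pvQ7 pvQ8 pvQ9 pvQ10
  generalize pvNorm t = u
  simp only [pvTagMappings, PySem.Dict.get?_mk_cons]
  by_cases h1 : "vegetarian" = u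
  · subst h1; simp [pvMk, PySem.Dict.insert]
  rw [if_neg (by simpa using h1)]
  by_cases h2 : "vegan" = u
  · subst h2; simp [pvMk, PySem.Dict.insert]
  rw [if_neg (by simpa using h2)]
  by_cases h3 : "gluten-free" = u
  · subst h3; simp [pvMk, PySem.Dict.insert]
  rw [if_neg (by simpa using h3)]
  by_cases h4 : "gluten free" = u
  · subst h4; simp [pvMk, PySem.Dict.insert]
  rw [if_neg (by simpa using h4)]
  by_cases h5 : "dairy-free" = u
  · subst h5; simp [pvMk, PySem.Dict.insert]
  rw [if_neg (by simpa using h5)]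
  by_cases h6 : "dairy free" = u
  · subst h6; simp [pvMk, PySem.Dict.insert]
  rw [if_neg (by simpa using h6)]
  by_cases h7 : "nut-free" = u
  · subst h7; simp [pvMk, PySem.Dict.insert]
  rw [if_neg (by simpa using h7)]
  by_cases h8 : "nut free" = u
  · subst h8; simp [pvMk, PySem.Dict.insert]
  rw [if_neg (by simpa using h8)]
  by_cases h9 : "keto" = u
  · subst h9; simp [pvMk, PySem.Dict.insert]
  rw [if_neg (by simpa using h9)]
  by_cases h10 : "ketogenic" = u
  · subst h10; simp [pvMk, PySem.Dict.insert]
  rw [if_neg (by simpa using h10)]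
  by_cases h11 : "paleo" = u
  · subst h11; simp [pvMk, PySem.Dict.insert]
  rw [if_neg (by simpa using h11)]
  by_cases h12 : "low-carb" = u
  · subst h12; simp [pvMk, PySem.Dict.insert]
  rw [if_neg (by simpa using h12)]
  by_cases h13 : "low carb" = u
  · subst h13; simp [pvMk, PySem.Dict.insert]
  rw [if_neg (by simpa using h13)]
  by_cases h14 : "high-protein" = u
  · subst h14; simp [pvMk, PySem.Dict.insert]
  rw [if_neg (by simpa using h14)]
  by_cases h15 : "high protein" = u
  · subst h15; simp [pvMk, PySem.Dict.insert]
  rw [if_neg (by simpa using h15)]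
  by_cases h16 : "low-sodium" = u
  · subst h16; simp [pvMk, PySem.Dict.insert]
  rw [if_neg (by simpa using h16)]
  by_cases h17 : "low sodium" = u
  · subst h17; simp [pvMk, PySem.Dict.insert]
  rw [if_neg (by simpa using h17)]
  simp [pvMk, PySem.Dict.get?, beq_iff_eq, Ne.symm h1, Ne.symm h2, Ne.symm h3, Ne.symm h4, Ne.symm h5, Ne.symm h6, Ne.symm h7, Ne.symm h8, Ne.symm h9, Ne.symm h10, Ne.symm h11, Ne.symm h12, Ne.symm h13, Ne.symm h14, Ne.symm h15, Ne.symm h16, Ne.symm h17]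

lemma pvFoldA (tags : List String) :
    ∀ b1 b2 b3 b4 b5 b6 b7 b8 b9 b10 : Bool,
    tags.foldl pvStepA (pvMk b1 b2 b3 b4 b5 b6 b7 b8 b9 b10) =
    pvMk (b1 || tags.any pvQ1) (b2 || tags.any pvQ2) (b3 || tags.any pvQ3)
         (b4 || tags.any pvQ4) (b5 || tags.any pvQ5) (b6 || tags.any pvQ6)
         (b7 || tags.any pvQ7) (b8 || tags.any pvQ8) (b9 || tags.any pvQ9)
         (b10 || tags.any pvQ10) := by
  induction tags with
  | nil => intro b1 b2 b3 b4 b5 b6 b7 b8 b9 b10; simp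
  | cons t ts ih =>
    intro b1 b2 b3 b4 b5 b6 b7 b8 b9 b10
    simp only [List.foldl_cons, pvStepA_mk, ih, List.any_cons, Bool.or_assoc]

-- decide-membership in the normalized list as an any over the tags (specific to pvNorm)
lemma pvContains2 (tags : List String) (s : String) :
    decide (s ∈ tags.map pvNorm) = tags.any (fun t => pvNorm t == s) := by
  induction tags with
  | nil => simp
  | cons t ts ih =>
    have hb : (pvNorm t == s) = decide (s = pvNorm t) := by
      by_cases h : s = pvNorm t
      · subst h; simp
      · simp only [h, decide_false, beq_eq_false_iff_ne]
        exact fun e => h e.symm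
    simp only [List.map_cons, List.mem_cons, List.any_cons, Bool.decide_or, ih, hb]

-- any distributes over a pointwise || (no library lemma found by exact?/simp?)
lemma pvAny2 (tags : List String) (p q : String → Bool) :
    tags.any (fun t => p t || q t) = (tags.any p || tags.any q) := by
  induction tags with
  | nil => simp
  | cons t ts ih => simp [List.any_cons, ih, Bool.or_assoc, Bool.or_left_comm]

lemma pvAlt_eq (tags : List String) :
    extract_dietary_restrictions_alt tags =
    (pvMk (tags.any pvQ1) (tags.any pvQ2) (tags.any pvQ3) (tags.any pvQ4) (tags.any pvQ5)
          (tags.any pvQ6) (tags.any pvQ7) (tags.any pvQ8) (tags.any pvQ9) (tags.any pvQ10)).items := by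
  unfold extract_dietary_restrictions_alt pvCategories pvMk pvQ1 pvQ2 pvQ3 pvQ4 pvQ5 pvQ6 pvQ7 pvQ8 pvQ9 pvQ10
  simp only [List.map_cons, List.map_nil, List.any_cons, List.any_nil, Bool.or_false,
    PySem.Set.contains_eq_listContains, List.contains_eq_mem, PySem.Set.mem_ofList,
    pvContains2, ← pvAny2]

-- ===== VERDICT (by name: the statement is the Claim_ definition above) =====
theorem extract_dietary_restrictions_spec : Claim_equal_extract_dietary_restrictions := by
  intro tags _
  show extract_dietary_restrictions tags = extract_dietary_restrictions_alt tags
  unfold extract_dietary_restrictions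
  have h0 : pvDietaryMap0 = pvMk false false false false false false false false false false := rfl
  rw [h0, pvFoldA, pvAlt_eq]
  simp
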